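-- pv_equiv track=rewrite | github.com/bibleman-stan/readers-gnt | scripts/apply_vocative_rule.py | group_consecutive
-- ===== SOURCE A (Python) =====
-- def group_consecutive(words_list):
--     """Group consecutive vocative words (gap <= 2) into phrases."""
--     if not words_list:
--         return []
--     groups = []
--     cur = [words_list[0]]
--     for i in range(1, len(words_list)):
--         if words_list[i][0] - cur[-1][0] <= 2:
--             cur.append(words_list[i])
--         else:
--             groups.append([w for _, w in cur])
--             cur = [words_list[i]]
--     groups.append([w for _, w in cur])
--     return groups
-- ===== SOURCE B (Python) =====
-- def _take_run(prev, rest):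
--     """Longest prefix of rest chained to prev by index gaps <= 2, plus the remainder."""
--     if rest and rest[0][0] - prev[0] <= 2:
--         run, rem = _take_run(rest[0], rest[1:])
--         return [rest[0]] + run, rem
--     return [], rest
--
--
-- def group_consecutive(words_list):
--     """Group consecutive vocative words (gap <= 2) into phrases."""
--     if not words_list:
--         return []
--     head, tail = words_list[0], words_list[1:]
--     run, rest = _take_run(head, tail)
--     return [[w for _, w in [head] + run]] + group_consecutive(rest)
-- ===== Notes on version B (the rewrite author's own statement) =====
-- stated objective: alternative
-- what changed: Replaces the online accumulator loop (groups/cur state with per-element append-or-flush) by a recursive split-at-first-break decomposition: a helper peels off the maximal chained run, the function emits it as one phrase and recurses on the remainder.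
import Mathlib
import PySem

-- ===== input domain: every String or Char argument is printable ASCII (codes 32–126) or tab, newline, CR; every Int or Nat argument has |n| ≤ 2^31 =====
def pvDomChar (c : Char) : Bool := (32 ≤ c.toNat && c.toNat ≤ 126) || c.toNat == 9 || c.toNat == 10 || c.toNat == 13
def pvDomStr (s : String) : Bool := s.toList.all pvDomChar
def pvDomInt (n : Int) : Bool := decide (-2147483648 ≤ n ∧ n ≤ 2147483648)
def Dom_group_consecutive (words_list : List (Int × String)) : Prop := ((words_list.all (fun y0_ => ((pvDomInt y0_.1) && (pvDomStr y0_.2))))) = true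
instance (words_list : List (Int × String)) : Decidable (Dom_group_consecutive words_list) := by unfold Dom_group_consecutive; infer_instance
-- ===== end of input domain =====

-- B replaces A's online accumulator loop by a recursive split-at-first-break decomposition (same cost, alternative structure).



-- ===== PORT A =====
-- loop over words_list[1:] carrying (groups, cur); cur is always nonempty, cur[-1] read via getLastD
def gcLoop : List (Int × String) → List (List String) → List (Int × String) → List (List String)
  | [], groups, cur => groups ++ [cur.map Prod.snd]
  | x :: rest, groups, cur =>
    if x.1 - (cur.getLastD (0, "")).1 ≤ 2 then
      gcLoop rest groups (cur ++ [x])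
    else
      gcLoop rest (groups ++ [cur.map Prod.snd]) [x]

def group_consecutive (words_list : List (Int × String)) : List (List String) :=
  match words_list with
  | [] => []
  | h :: t => gcLoop t [] [h]

-- ===== PORT B =====
-- helper needed by the port of B for termination (the remainder is no longer than the input)
def takeRun (prev : Int × String) : List (Int × String) → List (Int × String) × List (Int × String)
  | [] => ([], [])
  | x :: rest =>
    if x.1 - prev.1 ≤ 2 then
      (x :: (takeRun x rest).1, (takeRun x rest).2)
    else
      ([], x :: rest)

theorem takeRun_snd_len : ∀ (l : List (Int × String)) (p : Int × String), (takeRun p l).2.length ≤ l.length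
  | [], p => by simp [takeRun]
  | x :: rest, p => by
    simp only [takeRun]
    split
    · have := takeRun_snd_len rest x
      simpa using Nat.le_succ_of_le this
    · simp

def group_consecutive_alt (words_list : List (Int × String)) : List (List String) :=
  match words_list with
  | [] => []
  | h :: t =>
    ((h :: (takeRun h t).1).map Prod.snd) :: group_consecutive_alt ((takeRun h t).2)
termination_by words_list.length
decreasing_by
  have := takeRun_snd_len t h
  simp
  omega

-- ===== PRECONDITION & SPEC =====
def Spec_group_consecutive (words_list : List (Int × String)) (out : List (List String)) : Prop := out = group_consecutive_alt words_list
instance (words_list : List (Int × String)) (out : List (List String)) : Decidable (Spec_group_consecutive words_list out) := by unfold Spec_group_consecutive; infer_instance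

-- ===== CLAIM (what is proved, stated in full; the proofs are below) =====
def Claim_equal_group_consecutive : Prop := ∀ (words_list : List (Int × String)), Dom_group_consecutive words_list → Spec_group_consecutive words_list (group_consecutive words_list)


-- ===== LEMMAS AND PROOFS =====
theorem gcLoop_acc : ∀ (t : List (Int × String)) (groups : List (List String)) (cur : List (Int × String)),
    gcLoop t groups cur = groups ++ gcLoop t [] cur
  | [], groups, cur => by simp [gcLoop]
  | x :: rest, groups, cur => by
    simp only [gcLoop]
    split
    · rw [gcLoop_acc rest groups (cur ++ [x])]
    · rw [gcLoop_acc rest (groups ++ [cur.map Prod.snd]) [x]]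
      simp only [List.nil_append]
      rw [gcLoop_acc rest [cur.map Prod.snd] [x]]
      simp

theorem gcLoop_main : ∀ (t : List (Int × String)) (cur : List (Int × String)) (p : Int × String),
    cur ≠ [] → cur.getLastD (0, "") = p →
    gcLoop t [] cur = ((cur ++ (takeRun p t).1).map Prod.snd) :: group_consecutive_alt ((takeRun p t).2)
  | [], cur, p, hne, hlast => by
    simp [gcLoop, takeRun, group_consecutive_alt]
  | x :: rest, cur, p, hne, hlast => by
    simp only [gcLoop, takeRun, hlast]
    split
    · rw [gcLoop_main rest (cur ++ [x]) x (by simp) (by simp)]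
      simp
    · simp only [List.nil_append]
      rw [gcLoop_acc rest [cur.map Prod.snd] [x],
        gcLoop_main rest [x] x (by simp) (by simp)]
      have : group_consecutive_alt (x :: rest)
          = ((x :: (takeRun x rest).1).map Prod.snd) :: group_consecutive_alt ((takeRun x rest).2) := by
        simp [group_consecutive_alt]
      simp [this]

-- ===== VERDICT (by name: the statement is the Claim_ definition above) =====
theorem group_consecutive_spec : Claim_equal_group_consecutive := by
  intro ws _
  unfold Spec_group_consecutive
  match ws with
  | [] => simp [group_consecutive, group_consecutive_alt]
  | h :: t =>
    show gcLoop t [] [h] = _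
    rw [gcLoop_main t [h] h (by simp) (by simp)]
    simp [group_consecutive_alt]
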